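-- pv_equiv track=rewrite | github.com/KarlTDebiec/Scinoephile | scinoephile/core/eng/__init__.py | _replace_half_width_double_quotes
-- ===== SOURCE A (Python) =====
-- def _replace_half_width_double_quotes(text: str) -> str:
--     """Replace straight double quotes (") with curly quotes (“/”).
--
--     Arguments:
--         text: text in which to replace quotes
--     Returns:
--         text with quotes replaced
--     """
--     count = text.count('"')
--     if count == 0 or count % 2 != 0:
--         return text
--     result: list[str] = []
--     next_quote_should_be_an_open_quote = True
--
--     for character in text:
--         if character == '"':
--             if next_quote_should_be_an_open_quote:
--                 result.append("“")
--             else: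
--                 result.append("”")
--             next_quote_should_be_an_open_quote = not next_quote_should_be_an_open_quote
--         else:
--             result.append(character)
--
--     return "".join(result)
-- ===== SOURCE B (Python) =====
-- def _replace_half_width_double_quotes(text: str) -> str:
--     """Replace straight double quotes (") with curly quotes, via split + parity rejoin."""
--     count = text.count('"')
--     if count == 0 or count % 2 != 0:
--         return text
--     parts = text.split('"')
--     out = parts[0]
--     for i, part in enumerate(parts[1:]):
--         out += ('“' if i % 2 == 0 else '”') + part
--     return out
-- ===== Notes on version B (the rewrite author's own statement) =====
-- stated objective: alternative
-- what changed: Replaces the character-by-character scan with a toggling boolean flag by splitting the text on the double-quote character and rejoining the segments with opening/closing curly quotes chosen by the parity of the gap index.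
import Mathlib
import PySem

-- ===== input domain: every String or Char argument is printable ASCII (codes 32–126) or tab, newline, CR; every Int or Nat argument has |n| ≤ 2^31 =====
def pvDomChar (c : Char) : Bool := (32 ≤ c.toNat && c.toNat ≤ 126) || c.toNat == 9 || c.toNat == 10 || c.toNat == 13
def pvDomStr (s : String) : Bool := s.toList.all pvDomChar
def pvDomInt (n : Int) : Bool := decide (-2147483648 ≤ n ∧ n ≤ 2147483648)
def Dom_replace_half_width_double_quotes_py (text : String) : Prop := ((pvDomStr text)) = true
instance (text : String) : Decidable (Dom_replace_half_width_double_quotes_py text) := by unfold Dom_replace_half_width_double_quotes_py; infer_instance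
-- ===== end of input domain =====

-- B replaces A's character scan with a toggling flag by split-on-'"' and a parity-indexed rejoin; alternative decomposition, same cost.

-- ===== PORT A =====
def replace_half_width_double_quotes_py (text : String) : String :=
  if PySem.Str.count text "\"" = 0 ∨ PySem.Str.count text "\"" % 2 ≠ 0 then text
  else
    PySem.Str.join ""
      (text.toList.foldl
        (fun (st : List String × Bool) c =>
          if c = '"' then
            (st.1 ++ [if st.2 then "“" else "”"], !st.2)
          else (st.1 ++ [String.ofList [c]], st.2))
        ([], true)).1

-- ===== PORT B =====
def replace_half_width_double_quotes_py_alt (text : String) : String :=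
  if PySem.Str.count text "\"" = 0 ∨ PySem.Str.count text "\"" % 2 ≠ 0 then text
  else
    match PySem.Str.split? text "\"" with
    | none => text        -- unreachable: the separator is nonempty
    | some parts =>
      match parts with
      | [] => text        -- unreachable: split always returns at least one part
      | p0 :: rest =>
        (PySem.List.enumerate rest 0).foldl
          (fun out ip => out ++ ((if PySem.Int.mod ip.1 2 = 0 then "“" else "”") ++ ip.2)) p0

-- ===== PRECONDITION & SPEC =====
def Spec_replace_half_width_double_quotes_py (text : String) (out : String) : Prop := out = replace_half_width_double_quotes_py_alt text
instance (text : String) (out : String) : Decidable (Spec_replace_half_width_double_quotes_py text out) := by unfold Spec_replace_half_width_double_quotes_py; infer_instance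

-- ===== CLAIM (what is proved, stated in full; the proofs are below) =====
def Claim_equal_replace_half_width_double_quotes_py : Prop := ∀ (text : String), Dom_replace_half_width_double_quotes_py text → Spec_replace_half_width_double_quotes_py text (replace_half_width_double_quotes_py text)

-- ===== LEMMAS AND PROOFS =====

-- the common character-level result: scan with alternating flag
def convQ : List Char → Bool → List Char
  | [], _ => []
  | c :: l, b => if c = '"' then (if b then '“' else '”') :: convQ l (!b) else c :: convQ l b

-- simple structural split on '"'
def splitQ : List Char → List (List Char)
  | [] => [[]]
  | c :: l =>
    match splitQ l with
    | [] => []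
    | p :: ps => if c = '"' then [] :: p :: ps else (c :: p) :: ps

-- rejoin segments with alternating quotes
def altJ : Bool → List (List Char) → List Char
  | _, [] => []
  | b, p :: ps => (if b then '“' else '”') :: (p ++ altJ (!b) ps)

theorem splitQ_ne_nil (l : List Char) : splitQ l ≠ [] := by
  induction l with
  | nil => simp [splitQ]
  | cons c t ih =>
    cases h : splitQ t with
    | nil => exact absurd h ih
    | cons p ps =>
      simp only [splitQ, h]
      split <;> simp

theorem splitOn_go_quote (fuel : Nat) (l cur : List Char) (acc : List (List Char))
    (h : l.length ≤ fuel) :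
    PySem.Chars.splitOn.go ['"'] fuel l cur acc =
      acc.reverse ++ (match splitQ l with
        | [] => []
        | p :: ps => (cur.reverse ++ p) :: ps) := by
  induction fuel generalizing l cur acc with
  | zero =>
    have : l = [] := List.length_eq_zero_iff.mp (Nat.le_zero.mp h)
    subst this
    simp [PySem.Chars.splitOn.go, splitQ]
  | succ n ih =>
    cases l with
    | nil => simp [PySem.Chars.splitOn.go, splitQ]
    | cons c rest =>
      by_cases hc : c = '"'
      · subst hc
        have hpre : List.isPrefixOf ['"'] ('"' :: rest) = true := by
          simp [List.isPrefixOf]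
        rw [PySem.Chars.splitOn.go]
        simp only [hpre, if_pos, List.length_cons, List.length_nil, List.drop_succ_cons,
          List.drop_zero]
        rw [ih rest [] (cur.reverse :: acc) (by simpa using Nat.le_of_succ_le_succ h)]
        cases hs : splitQ rest with
        | nil => exact absurd hs (splitQ_ne_nil rest)
        | cons p ps => simp [splitQ, hs]
      · have hpre : List.isPrefixOf ['"'] (c :: rest) = false := by
          simp [List.isPrefixOf]
          exact fun h' => hc h'.symm
        rw [PySem.Chars.splitOn.go]
        simp only [hpre, Bool.false_eq_true, if_false]
        rw [ih rest (c :: cur) acc (by simpa using Nat.le_of_succ_le_succ h)]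
        cases hs : splitQ rest with
        | nil => exact absurd hs (splitQ_ne_nil rest)
        | cons p ps => simp [splitQ, hs, hc]

theorem splitOn_quote (l : List Char) : PySem.Chars.splitOn l ['"'] = splitQ l := by
  rw [PySem.Chars.splitOn, splitOn_go_quote (l.length + 1) l [] [] (Nat.le_succ _)]
  cases hs : splitQ l with
  | nil => exact absurd hs (splitQ_ne_nil l)
  | cons p ps => simp

theorem convQ_eq_altJ (l : List Char) (b : Bool) :
    convQ l b = (match splitQ l with | [] => [] | p :: ps => p ++ altJ b ps) := by
  induction l generalizing b with
  | nil => simp [convQ, splitQ, altJ]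
  | cons c t ih =>
    cases hs : splitQ t with
    | nil => exact absurd hs (splitQ_ne_nil t)
    | cons p ps =>
      by_cases hc : c = '"'
      · subst hc
        simp [convQ, splitQ, hs, ih, altJ]
      · simp [convQ, splitQ, hs, hc, ih]

-- A's pieces list, structurally
def piecesA : List Char → Bool → List String
  | [], _ => []
  | c :: l, b =>
    if c = '"' then (if b then "“" else "”") :: piecesA l (!b)
    else String.ofList [c] :: piecesA l b

theorem foldlA_eq (l : List Char) (res : List String) (b : Bool) :
    (l.foldl
      (fun (st : List String × Bool) c =>
        if c = '"' then
          (st.1 ++ [if st.2 then "“" else "”"], !st.2)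
        else (st.1 ++ [String.ofList [c]], st.2))
      (res, b)).1 = res ++ piecesA l b := by
  induction l generalizing res b with
  | nil => simp [piecesA]
  | cons c t ih =>
    by_cases hc : c = '"'
    · subst hc
      simp [List.foldl_cons, piecesA, ih]
    · simp [List.foldl_cons, hc, piecesA, ih]

theorem joinC : ∀ ps : List (List Char), PySem.Chars.join [] ps = ps.flatten
  | [] => PySem.Chars.join_nil []
  | [p] => by rw [PySem.Chars.join_singleton]; simp
  | p :: q :: r => by rw [PySem.Chars.join_cons_cons, joinC (q :: r)]; simp

theorem join_empty (ps : List String) :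
    PySem.Str.join "" ps = String.ofList ((ps.map String.toList).flatten) := by
  rw [PySem.Str.join, show ("" : String).toList = [] from rfl, joinC]

theorem flatten_piecesA (l : List Char) (b : Bool) :
    ((piecesA l b).map String.toList).flatten = convQ l b := by
  induction l generalizing b with
  | nil => simp [piecesA, convQ]
  | cons c t ih =>
    by_cases hc : c = '"'
    · subst hc
      cases b <;> simp [piecesA, convQ, ih]
    · simp [piecesA, convQ, hc, ih]

theorem foldlB_eq (rest : List String) (s : Int) (out0 : String) (b : Bool)
    (hb : b = decide (PySem.Int.mod s 2 = 0)) :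
    (PySem.List.enumerate rest s).foldl
        (fun out ip => out ++ ((if PySem.Int.mod ip.1 2 = 0 then "“" else "”") ++ ip.2)) out0
      = out0 ++ String.ofList (altJ b (rest.map String.toList)) := by
  induction rest generalizing s out0 b with
  | nil =>
    apply String.toList_inj.mp
    simp [PySem.List.enumerate, altJ]
  | cons p t ih =>
    rw [PySem.List.enumerate_cons, List.foldl_cons]
    have hb' : (!b) = decide (PySem.Int.mod (s + 1) 2 = 0) := by
      by_cases hm : s % 2 = 0
      · have h1 : (s + 1) % 2 = 1 := by omega
        simp [hb, hm, h1]
      · have h0 : (s + 1) % 2 = 0 := by omega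
        simp [hb, hm, h0]
    rw [ih (s + 1) _ (!b) hb']
    by_cases hm : PySem.Int.mod s 2 = 0
    · have hbt : b = true := by rw [hb]; exact decide_eq_true hm
      subst hbt
      rw [if_pos hm]
      apply String.toList_inj.mp
      simp [altJ, String.toList_append, String.toList_ofList]
    · have hbf : b = false := by rw [hb]; exact decide_eq_false hm
      subst hbf
      rw [if_neg hm]
      apply String.toList_inj.mp
      simp [altJ, String.toList_append, String.toList_ofList]

-- ===== VERDICT (by name: the statement is the Claim_ definition above) =====
theorem replace_half_width_double_quotes_py_spec : Claim_equal_replace_half_width_double_quotes_py := by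
  intro text _
  unfold Spec_replace_half_width_double_quotes_py
  unfold replace_half_width_double_quotes_py replace_half_width_double_quotes_py_alt
  split_ifs with hg
  · rfl
  · have hsplit : PySem.Str.split? text "\"" =
        some ((splitQ text.toList).map String.ofList) := by
      simp [PySem.Str.split?, PySem.Chars.split?, splitOn_quote,
        show ("\"" : String).toList = ['"'] from rfl]
    rw [hsplit]
    cases hs : splitQ text.toList with
    | nil => exact absurd hs (splitQ_ne_nil _)
    | cons q0 qs =>
      simp only [List.map_cons]
      rw [foldlB_eq (qs.map String.ofList) 0 (String.ofList q0) true (by decide)]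
      rw [foldlA_eq text.toList [] true, List.nil_append, join_empty, flatten_piecesA]
      rw [convQ_eq_altJ text.toList true, hs]
      apply String.toList_inj.mp
      simp only [String.toList_append, String.toList_ofList, List.map_map]
      rw [show List.map (String.toList ∘ String.ofList) qs = qs by
        simp [Function.comp_def]]
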